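-- pv_equiv track=rewrite | github.com/velkater/tgpc | tgpc.py | is_eipal
-- ===== SOURCE A (Python) =====
-- import math
--
-- def Ei(i):
--     """The involutory antimorphism Ei.
--
--     Args:
--         i : Either 0, 1, 2 or "0", "1", "2"
--
--     Returns:
--         A tuple corresponding to the involutory antimorphism Ei.
--
--     Examples:
--         >>> Ei(0)
--         ('0', '2', '1')
--         >>> Ei(1)
--         ('2', '1', '0')
--         >>> Ei(2)
--         ('1', '0', '2')
--     """
--     # Checking correct input
--     if i not in {0, 1, 2, "0", "1", "2"}:
--         raise ValueError("{} is not in A = {{0,1,2}}".format(i))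
--
--     i = int(i)
--     ei = [0,0,0]
--     ei[i] = str(i)
--     ei[(i+1)%3] = str((2+i)%3)
--     ei[(i+2)%3] = str((1+i)%3)
--     return tuple(ei)
--
-- def is_eipal(seq, i):
--     """Checks if a word is an Ei-palindrome.
--
--     Args:
--         seq (string): The word checked composed
--             of the letters "0", "1" and "2".
--         i: Pseudopalindromic type, can be either 0, 1, 2, or
--             "0", "1", "2", standing for E_0, E_1 and E_2.
--
--     Returns:
--         True if the word is an Ei-palindrome, otherwise False.
--
--     Examples:
--         >>> is_eipal("012", 1)
--         True
--         >>> is_eipal("002", 1)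
--         False
--     """
--     # Checking correct input
--     if i not in {0, 1, 2, "0", "1", "2"}:
--         raise ValueError("{} is not in A = {{0,1,2}}".format(i))
--     _check_ternary(seq)
--
--     ei = Ei(i)
--     l = len(seq)
--     if l == 1:
--         if seq == str(i):
--             return True
--         else:
--             return False
--     for x in range(0, math.ceil(l/2)):
--         if seq[x] != ei[int(seq[l-1-x])]:
--             return False
--     return(True)
--
-- def _check_ternary(seq):
--     """Raises an error if seq is not in A = {"0","1", "2"}"""
--     if not all([x in set("012") for x in seq]):
--         raise ValueError("{} is not in A = {{0,1,2}}".format(seq))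
-- ===== SOURCE B (Python) =====
-- import math
--
-- def Ei(i):
--     if i not in {0, 1, 2, "0", "1", "2"}:
--         raise ValueError("{} is not in A = {{0,1,2}}".format(i))
--     i = int(i)
--     ei = [0, 0, 0]
--     ei[i] = str(i)
--     ei[(i + 1) % 3] = str((2 + i) % 3)
--     ei[(i + 2) % 3] = str((1 + i) % 3)
--     return tuple(ei)
--
-- def _check_ternary(seq):
--     if not all([x in set("012") for x in seq]):
--         raise ValueError("{} is not in A = {{0,1,2}}".format(seq))
--
-- def is_eipal(seq, i):
--     """Checks if a word is an Ei-palindrome (whole-image comparison)."""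
--     if i not in {0, 1, 2, "0", "1", "2"}:
--         raise ValueError("{} is not in A = {{0,1,2}}".format(i))
--     _check_ternary(seq)
--     ei = Ei(i)
--     image = "".join(ei[int(c)] for c in reversed(seq))
--     return seq == image
-- ===== Notes on version B (the rewrite author's own statement) =====
-- stated objective: simpler
-- what changed: Instead of a two-ended index loop over the first half with early exit (plus a length-1 special case), B builds the full antimorphic image of the reversed word in one comprehension and returns a single whole-string equality; the involution property makes the half check equal to the full check.
import Mathlib
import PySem

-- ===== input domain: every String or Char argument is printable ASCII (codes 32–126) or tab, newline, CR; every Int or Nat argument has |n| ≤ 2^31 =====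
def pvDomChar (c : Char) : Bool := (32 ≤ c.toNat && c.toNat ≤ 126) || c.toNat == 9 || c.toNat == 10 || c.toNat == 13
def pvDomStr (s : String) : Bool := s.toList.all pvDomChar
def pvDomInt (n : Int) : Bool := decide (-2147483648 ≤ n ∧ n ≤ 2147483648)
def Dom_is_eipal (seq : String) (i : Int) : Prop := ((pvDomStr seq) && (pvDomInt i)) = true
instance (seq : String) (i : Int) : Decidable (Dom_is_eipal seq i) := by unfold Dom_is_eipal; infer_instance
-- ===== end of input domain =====

-- B replaces A's two-ended first-half index loop (early exit, length-1 special case) by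
-- building the whole antimorphic image of the reversed word and one equality test (simpler).

-- ===== PORT A =====
-- str(n) for n ∈ {0,1,2}: the single digit character (exact on that domain)
def pvDigit (n : Int) : Char := Char.ofNat (48 + n.toNat)

-- int(c) for c ∈ {'0','1','2'} (exact on the ternary domain Pre_ admits)
def pvCharVal (c : Char) : Int := (c.toNat : Int) - 48

-- port of Ei(i) for i ∈ {0,1,2} (the ValueError branch lies outside Pre_)
def Ei_port (i : Int) : List Char :=
  -- ei = [0,0,0]; all three slots are overwritten below, '0' is the placeholder
  let ei : List Char := ['0', '0', '0']
  let ei := ei.set i.toNat (pvDigit i)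
  let ei := ei.set (PySem.Int.mod (i + 1) 3).toNat (pvDigit (PySem.Int.mod (2 + i) 3))
  let ei := ei.set (PySem.Int.mod (i + 2) 3).toNat (pvDigit (PySem.Int.mod (1 + i) 3))
  ei

-- the for-loop over range(0, ceil(l/2)) with its early `return False`
def checkA (L ei : List Char) (l : Int) : List Int → Bool
  | [] => true
  | x :: xs =>
    match PySem.List.pyGet? L x, PySem.List.pyGet? L (l - 1 - x) with
    | some a, some b =>
      match PySem.List.pyGet? ei (pvCharVal b) with
      | some e => if a ≠ e then false else checkA L ei l xs
      | none => false
    | _, _ => false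

def is_eipal (seq : String) (i : Int) : Bool :=
  if ¬ (i = 0 ∨ i = 1 ∨ i = 2) then false            -- ValueError: outside Pre_
  else if ¬ (seq.toList.all fun c => c == '0' || c == '1' || c == '2') then false
                                                      -- _check_ternary raises: outside Pre_
  else
    let ei := Ei_port i
    let L := seq.toList
    let l : Int := (L.length : Int)
    if l = 1 then
      (if seq.toList = PySem.Int.toChars i then true else false)   -- seq == str(i)
    else
      -- math.ceil(l/2) = (l+1)//2 for an integer l ≥ 0
      checkA L ei l (PySem.List.pyRange 0 (PySem.Int.floordiv (l + 1) 2) 1)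

-- ===== PORT B =====
-- ei[int(c)]; the index is always in range on the ternary domain Pre_ admits
def eiApply (ei : List Char) (c : Char) : Char :=
  (PySem.List.pyGet? ei (pvCharVal c)).getD c

def is_eipal_alt (seq : String) (i : Int) : Bool :=
  if ¬ (i = 0 ∨ i = 1 ∨ i = 2) then false            -- ValueError: outside Pre_
  else if ¬ (seq.toList.all fun c => c == '0' || c == '1' || c == '2') then false
                                                      -- _check_ternary raises: outside Pre_
  else
    let ei := Ei_port i
    -- image = "".join(ei[int(c)] for c in reversed(seq)); return seq == image
    decide (seq.toList = seq.toList.reverse.map (eiApply ei))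

-- ===== PRECONDITION & SPEC =====
-- Pre_ excludes exactly the inputs on which Python A raises ValueError:
-- i outside {0,1,2} or a character of seq outside {'0','1','2'}.
def Pre_is_eipal (seq : String) (i : Int) : Prop :=
  (i = 0 ∨ i = 1 ∨ i = 2) ∧
    (seq.toList.all fun c => c == '0' || c == '1' || c == '2') = true
instance (seq : String) (i : Int) : Decidable (Pre_is_eipal seq i) := by
  unfold Pre_is_eipal; infer_instance

def pvWitness_is_eipal : String × Int := ("012", 1)

def Spec_is_eipal (seq : String) (i : Int) (out : Bool) : Prop := out = is_eipal_alt seq i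
instance (seq : String) (i : Int) (out : Bool) : Decidable (Spec_is_eipal seq i out) := by
  unfold Spec_is_eipal; infer_instance

-- ===== CLAIM (what is proved, stated in full; the proofs are below) =====
def Claim_equal_is_eipal : Prop := ∀ (seq : String) (i : Int),
  Dom_is_eipal seq i → Pre_is_eipal seq i → Spec_is_eipal seq i (is_eipal seq i)

-- ===== LEMMAS AND PROOFS =====

-- eiApply (Ei_port i) is an involution on the ternary alphabet
theorem ei_invol (i : Int) (hi : i = 0 ∨ i = 1 ∨ i = 2) (c : Char)
    (hc : c = '0' ∨ c = '1' ∨ c = '2') :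
    eiApply (Ei_port i) (eiApply (Ei_port i) c) = c := by
  rcases hi with h | h | h <;> rcases hc with h2 | h2 | h2 <;> subst h h2 <;> decide

-- the tuple lookup ei[int(c)] never raises on a ternary character
theorem ei_get (i : Int) (hi : i = 0 ∨ i = 1 ∨ i = 2) (c : Char)
    (hc : c = '0' ∨ c = '1' ∨ c = '2') :
    PySem.List.pyGet? (Ei_port i) (pvCharVal c) = some (eiApply (Ei_port i) c) := by
  rcases hi with h | h | h <;> rcases hc with h2 | h2 | h2 <;> subst h h2 <;> decide

-- str(i) is the unique ternary fixed point of eiApply (Ei_port i)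
theorem ei_fix (i : Int) (hi : i = 0 ∨ i = 1 ∨ i = 2) (c : Char)
    (hc : c = '0' ∨ c = '1' ∨ c = '2') :
    ([c] = PySem.Int.toChars i) ↔ (c = eiApply (Ei_port i) c) := by
  rcases hi with h | h | h <;> rcases hc with h2 | h2 | h2 <;> subst h h2 <;> decide

-- one step of A's loop once the three lookups are known to succeed
theorem checkA_cons (L ei : List Char) (x : Int) (xs : List Int) (l : Int) (a b e : Char)
    (ha : PySem.List.pyGet? L x = some a) (hbb : PySem.List.pyGet? L (l - 1 - x) = some b)
    (he : PySem.List.pyGet? ei (pvCharVal b) = some e) :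
    checkA L ei l (x :: xs) = (if a ≠ e then false else checkA L ei l xs) := by
  rw [checkA, ha, hbb]
  show (match PySem.List.pyGet? ei (pvCharVal b) with
    | some e => if a ≠ e then false else checkA L ei l xs
    | none => false) = _
  rw [he]

-- A's loop over a list of in-range indices is the conjunction of the pointwise conditions
theorem checkA_iff (L ei : List Char)
    (hei : ∀ c, c = '0' ∨ c = '1' ∨ c = '2' →
      PySem.List.pyGet? ei (pvCharVal c) = some (eiApply ei c))
    (hL : ∀ c ∈ L, c = '0' ∨ c = '1' ∨ c = '2')
    (js : List Nat) (hjs : ∀ j ∈ js, j < L.length) :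
    checkA L ei (L.length : Int) (js.map (fun j => Int.ofNat j)) = true ↔
      ∀ j ∈ js, L[j]? = (L[L.length - 1 - j]?).map (eiApply ei) := by
  induction js with
  | nil => simp [checkA]
  | cons j js ih =>
    simp only [Int.ofNat_eq_natCast] at ih ⊢
    have hj : j < L.length := hjs j (by simp)
    have hj2 : L.length - 1 - j < L.length := by omega
    have hcast : (L.length : Int) - 1 - (j : Int) = ((L.length - 1 - j : Nat) : Int) := by
      omega
    have ha : PySem.List.pyGet? L (j : Int) = some L[j] := by
      simp [PySem.List.pyGet?_natCast, List.getElem?_eq_getElem hj]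
    have hbb : PySem.List.pyGet? L ((L.length : Int) - 1 - (j : Int)) =
        some L[L.length - 1 - j] := by
      rw [hcast]
      simp [PySem.List.pyGet?_natCast, List.getElem?_eq_getElem hj2]
    have hbt := hL _ (List.getElem_mem hj2)
    rw [List.map_cons, checkA_cons L ei _ _ _ _ _ _ ha hbb (hei _ hbt),
      List.forall_mem_cons]
    rw [List.getElem?_eq_getElem hj, List.getElem?_eq_getElem hj2]
    have ih' := ih (fun x hx => hjs x (by simp [hx]))
    by_cases hEq : L[j] = eiApply ei L[L.length - 1 - j]
    · simp [hEq, ih']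
    · simp [hEq]

-- B's whole-word equality, read off index-wise
theorem alt_iff (L : List Char) (f : Char → Char) :
    (L = L.reverse.map f) ↔
      ∀ k < L.length, L[k]? = (L[L.length - 1 - k]?).map f := by
  constructor
  · intro h k hk
    conv_lhs => rw [h]
    rw [List.getElem?_map, List.getElem?_reverse hk]
  · intro h
    apply List.ext_getElem?
    intro k
    by_cases hk : k < L.length
    · rw [List.getElem?_map, List.getElem?_reverse (by simpa using hk), ← h k hk]
    · rw [List.getElem?_eq_none (by omega), List.getElem?_eq_none (by simp; omega)]
-- checking the first half suffices, since f is an involution on the letters of L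
theorem half_iff_full (L : List Char) (f : Char → Char)
    (hf : ∀ c ∈ L, f (f c) = c) :
    (∀ j < (L.length + 1) / 2, L[j]? = (L[L.length - 1 - j]?).map f) ↔
      ∀ k < L.length, L[k]? = (L[L.length - 1 - k]?).map f := by
  constructor
  · intro h k hk
    by_cases hhalf : k < (L.length + 1) / 2
    · exact h k hhalf
    · have hj : L.length - 1 - k < (L.length + 1) / 2 := by omega
      have hcond := h (L.length - 1 - k) hj
      have hkk : L.length - 1 - (L.length - 1 - k) = k := by omega
      rw [hkk] at hcond
      have h1 : L[L.length - 1 - k]? = some L[L.length - 1 - k] :=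
        List.getElem?_eq_getElem (by omega)
      have h2 : L[k]? = some L[k] := List.getElem?_eq_getElem hk
      rw [h1, h2] at hcond ⊢
      simp only [Option.map_some] at hcond ⊢
      have hval : L[L.length - 1 - k] = f L[k] := by injection hcond
      rw [hval, hf _ (List.getElem_mem hk)]
  · intro h j hj
    exact h j (by omega)

-- ===== VERDICT (by name: the statement is the Claim_ definition above) =====
theorem is_eipal_spec : Claim_equal_is_eipal := by
  intro seq i _ hpre
  obtain ⟨hi, hall⟩ := hpre
  have hL : ∀ c ∈ seq.toList, c = '0' ∨ c = '1' ∨ c = '2' := by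
    intro c hc
    have := List.all_eq_true.mp hall c hc
    simp only [Bool.or_eq_true, beq_iff_eq] at this
    tauto
  simp only [Spec_is_eipal, is_eipal, is_eipal_alt, hall, not_not_intro hi,
    not_true, if_false]
  have hinv : ∀ c ∈ seq.toList,
      eiApply (Ei_port i) (eiApply (Ei_port i) c) = c :=
    fun c hc => ei_invol i hi c (hL c hc)
  have hiff : (seq.toList = seq.toList.reverse.map (eiApply (Ei_port i))) ↔
      ∀ j < (seq.toList.length + 1) / 2,
        seq.toList[j]? = (seq.toList[seq.toList.length - 1 - j]?).map (eiApply (Ei_port i)) :=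
    (alt_iff _ _).trans (half_iff_full _ _ hinv).symm
  by_cases hl1 : (seq.toList.length : Int) = 1
  · rw [if_pos hl1]
    have hlen : seq.toList.length = 1 := by omega
    obtain ⟨c, hc⟩ : ∃ c, seq.toList = [c] := List.length_eq_one_iff.mp hlen
    have hct : c = '0' ∨ c = '1' ∨ c = '2' := hL c (by rw [hc]; simp)
    rw [hc]
    have hred : (([c] : List Char) = List.map (eiApply (Ei_port i)) ([c].reverse)) ↔
        (c = eiApply (Ei_port i) c) := by simp
    by_cases hq : ([c] : List Char) = PySem.Int.toChars i
    · rw [if_pos hq]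
      symm
      rw [decide_eq_true_eq, hred]
      exact (ei_fix i hi c hct).mp hq
    · rw [if_neg hq]
      symm
      rw [decide_eq_false_iff_not, hred]
      exact fun hcon => hq ((ei_fix i hi c hct).mpr hcon)
  · rw [if_neg hl1]
    -- math.ceil(l/2) = (l+1)//2, as a Nat
    have hm : PySem.Int.floordiv ((seq.toList.length : Int) + 1) 2 =
        (((seq.toList.length + 1) / 2 : Nat) : Int) := by
      have h1 : ((seq.toList.length : Int) + 1) = ((seq.toList.length + 1 : Nat) : Int) := by
        push_cast; ring
      rw [h1]
      exact_mod_cast PySem.Int.floordiv_natCast (seq.toList.length + 1) 2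
    have hrange : PySem.List.pyRange 0 (((seq.toList.length + 1) / 2 : Nat) : Int) 1 =
        (List.range ((seq.toList.length + 1) / 2)).map (fun j => Int.ofNat j) := by
      rw [PySem.List.pyRange_one]
      have h2 : ((((seq.toList.length + 1) / 2 : Nat) : Int) - 0).toNat =
          (seq.toList.length + 1) / 2 := by omega
      rw [h2]
      simp
    have hjs : ∀ j ∈ List.range ((seq.toList.length + 1) / 2), j < seq.toList.length := by
      intro j hj
      have := List.mem_range.mp hj
      omega
    rw [hm, hrange, Bool.eq_iff_iff,
      checkA_iff seq.toList (Ei_port i) (fun c hc => ei_get i hi c hc) hL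
        (List.range ((seq.toList.length + 1) / 2)) hjs,
      decide_eq_true_eq, hiff]
    constructor
    · intro h j hj
      exact h j (List.mem_range.mpr hj)
    · intro h j hj
      exact h j (List.mem_range.mp hj)
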